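-- pv_equiv track=rewrite | github.com/KonchugovVE/python_phonebook | main.py | delete_by_lastname
-- ===== SOURCE A (Python) =====
-- def delete_by_lastname(phone_book,lastname):   # удаление записи нового абонента
--     numstroki=0
--     for line in range(len(phone_book)):
--        stroka = phone_book[line]
--        for key in stroka.keys():
--            if lastname == stroka[key]:
--                numstroki=line
--     phone_book.pop(numstroki)
--
--     return phone_book
-- ===== SOURCE B (Python) =====
-- def delete_by_lastname(phone_book, lastname):
--     # Reverse scan with early exit: the first match from the end is the last match.
--     target = 0
--     for i in range(len(phone_book) - 1, -1, -1):
--         if lastname in phone_book[i].values():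
--             target = i
--             break
--     phone_book.pop(target)
--     return phone_book
-- ===== Notes on version B (the rewrite author's own statement) =====
-- stated objective: alternative
-- what changed: A scans the whole book forwards, overwriting the target index on every match; B scans backwards and stops at the first match (the last match overall), testing 'lastname in record.values()' once per record instead of an explicit inner key loop.
import Mathlib
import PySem

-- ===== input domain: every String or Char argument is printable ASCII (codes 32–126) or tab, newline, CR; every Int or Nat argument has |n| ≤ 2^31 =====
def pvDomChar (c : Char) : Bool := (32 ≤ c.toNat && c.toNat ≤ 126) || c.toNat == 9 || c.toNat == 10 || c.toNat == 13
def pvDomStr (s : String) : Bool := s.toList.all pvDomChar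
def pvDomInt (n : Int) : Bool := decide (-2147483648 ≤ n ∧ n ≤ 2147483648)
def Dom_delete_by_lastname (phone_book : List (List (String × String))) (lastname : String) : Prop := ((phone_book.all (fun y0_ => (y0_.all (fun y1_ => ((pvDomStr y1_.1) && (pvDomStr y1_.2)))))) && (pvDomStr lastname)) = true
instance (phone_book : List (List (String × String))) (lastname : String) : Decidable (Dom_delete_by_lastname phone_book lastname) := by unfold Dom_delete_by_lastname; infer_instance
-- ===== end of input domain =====

-- B replaces A's exhaustive forward scan (last match overwrites the index) by a reverse scan
-- that stops at the first match; both mutate phone_book via pop — the equivalence proved here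
-- is about the RETURN value (both return the mutated list itself, so the mutation agrees too).

-- ===== PORT A =====
def delete_by_lastname (phone_book : List (List (String × String))) (lastname : String) : List (List (String × String)) :=
  let numstroki : Int :=
    (PySem.List.pyRange 0 (phone_book.length : Int) 1).foldl (fun num line =>
      let stroka := PySem.Dict.ofList ((PySem.List.pyGet? phone_book line).getD [])
      (PySem.Dict.keys stroka).foldl (fun num key =>
        -- stroka[key]: key comes from stroka.keys(), so the lookup always succeeds; getD "" is exact here
        if lastname == PySem.Dict.getD stroka key "" then line else num) num) 0
  match PySem.List.pop? phone_book numstroki with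
  | some r => r.2
  | none => []   -- IndexError (empty phone_book); excluded by Pre_

-- ===== PORT B =====
-- reverse scan: first index from the end whose record has lastname among its values; 0 if none
def pvRevFind (phone_book : List (List (String × String))) (lastname : String) : Nat → Nat
  | 0 => 0
  | i + 1 =>
    if lastname ∈ PySem.Dict.values (PySem.Dict.ofList (phone_book.getD (i + 1) [])) then i + 1
    else pvRevFind phone_book lastname i

def delete_by_lastname_alt (phone_book : List (List (String × String))) (lastname : String) : List (List (String × String)) :=
  let target : Nat := pvRevFind phone_book lastname (phone_book.length - 1)
  match PySem.List.pop? phone_book (target : Int) with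
  | some r => r.2
  | none => []   -- IndexError (empty phone_book); excluded by Pre_

-- ===== PRECONDITION & SPEC =====
-- Pre_ excludes only the empty phone book, on which both A and B raise IndexError via pop.
def Pre_delete_by_lastname (phone_book : List (List (String × String))) (lastname : String) : Prop := phone_book ≠ []
instance (phone_book : List (List (String × String))) (lastname : String) : Decidable (Pre_delete_by_lastname phone_book lastname) := by unfold Pre_delete_by_lastname; infer_instance

def pvWitness_delete_by_lastname : (List (List (String × String))) × String :=
  ([[("lastname", "Ivanov"), ("phone", "123")]], "Ivanov")

def Spec_delete_by_lastname (phone_book : List (List (String × String))) (lastname : String) (out : List (List (String × String))) : Prop := out = delete_by_lastname_alt phone_book lastname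
instance (phone_book : List (List (String × String))) (lastname : String) (out : List (List (String × String))) : Decidable (Spec_delete_by_lastname phone_book lastname out) := by unfold Spec_delete_by_lastname; infer_instance

-- ===== CLAIM (what is proved, stated in full; the proofs are below) =====
def Claim_equal_delete_by_lastname : Prop := ∀ (phone_book : List (List (String × String))) (lastname : String), Dom_delete_by_lastname phone_book lastname → Pre_delete_by_lastname phone_book lastname → Spec_delete_by_lastname phone_book lastname (delete_by_lastname phone_book lastname)

-- ===== LEMMAS AND PROOFS =====

-- A's inner loop: overwriting the accumulator with the constant v on every hit is just "any hit?"
theorem pv_foldl_ifconst {α : Type} (c : α → Bool) (v : Int) :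
    ∀ (ks : List α) (a : Int),
      ks.foldl (fun num k => if c k then v else num) a = if ks.any c then v else a := by
  intro ks
  induction ks with
  | nil => intro a; simp
  | cons x xs ih =>
    intro a
    simp only [List.foldl_cons, List.any_cons, ih]
    by_cases h : c x = true <;> simp [h]

-- A's hit condition on a record equals B's: some key's value is lastname ↔ lastname ∈ values
theorem pv_cond_eq (r : List (String × String)) (lastname : String) :
    ((PySem.Dict.ofList r).keys.any
        (fun k => lastname == PySem.Dict.getD (PySem.Dict.ofList r) k ""))
      = decide (lastname ∈ PySem.Dict.values (PySem.Dict.ofList r)) := by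
  rw [PySem.Dict.values_eq_map_keys (PySem.Dict.ofList r) (PySem.Dict.nodup_keys_ofList r) ""]
  rw [List.any_eq, decide_eq_decide, List.mem_map]
  constructor
  · rintro ⟨k, hk, h⟩; exact ⟨k, hk, (beq_iff_eq.mp h).symm⟩
  · rintro ⟨k, hk, h⟩; exact ⟨k, hk, beq_iff_eq.mpr h.symm⟩

-- forward fold recording the last hit = reverse scan stopping at the first hit
theorem pv_fold_eq_revFind (phone_book : List (List (String × String))) (lastname : String) :
    ∀ n : Nat,
      (List.range n).foldl
          (fun (num : Int) (k : Nat) =>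
            if lastname ∈ PySem.Dict.values (PySem.Dict.ofList (phone_book[k]?.getD []))
            then (k : Int) else num) 0
        = ((pvRevFind phone_book lastname (n - 1) : Nat) : Int) := by
  intro n
  induction n with
  | zero => simp [pvRevFind]
  | succ n ih =>
    rw [List.range_succ, List.foldl_append]
    simp only [List.foldl_cons, List.foldl_nil, ih]
    cases n with
    | zero =>
      by_cases h : lastname ∈ PySem.Dict.values (PySem.Dict.ofList (phone_book[0]?.getD [])) <;>
        simp [pvRevFind, h]
    | succ m =>
      by_cases h : lastname ∈ PySem.Dict.values (PySem.Dict.ofList (phone_book[m + 1]?.getD [])) <;>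
        simp [pvRevFind, List.getD_eq_getElem?_getD, h]

-- ===== VERDICT (by name: the statement is the Claim_ definition above) =====
theorem delete_by_lastname_spec : Claim_equal_delete_by_lastname := by
  intro phone_book lastname _ _
  show delete_by_lastname phone_book lastname = delete_by_lastname_alt phone_book lastname
  unfold delete_by_lastname delete_by_lastname_alt
  rw [PySem.List.pyRange_one]
  simp only [sub_zero, Int.toNat_natCast, List.foldl_map, zero_add,
    PySem.List.pyGet?_natCast, pv_foldl_ifconst, pv_cond_eq, decide_eq_true_eq]
  rw [pv_fold_eq_revFind]
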